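-- pv_equiv track=rewrite | github.com/MaximeLambertManzi/Algo_Practice | France IOI/Ex_3/Ex_3_5/Ex_3_5_2.py | check_validite
-- ===== SOURCE A (Python) =====
-- def check_validite(carre, taille):
--     liste_nb = [0] * (taille**2)
--
--     for loop1 in range(taille):
--         for loop2 in range(taille):
--             if (carre[loop1][loop2] > taille**2) or (carre[loop1][loop2] <= 0):
--                 return False
--
--             liste_nb[carre[loop1][loop2] - 1] += 1
--
--             if liste_nb[carre[loop1][loop2] - 1] > 1:
--                 return False
--
--     return True
-- ===== SOURCE B (Python) =====
-- def check_validite(carre, taille):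
--     vals = [carre[i][j] for i in range(taille) for j in range(taille)]
--     return sorted(vals) == list(range(1, len(vals) + 1))
-- ===== Notes on version B (the rewrite author's own statement) =====
-- stated objective: simpler
-- what changed: Replaces the per-cell bounds test, count array and early returns with one comprehension collecting all cells of the taille x taille region and a single comparison of its sorted order against list(range(1, count+1)).
-- outside the precondition, e.g. on check_validite([[0]], 2): A returns False, B raises IndexError
import Mathlib
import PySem

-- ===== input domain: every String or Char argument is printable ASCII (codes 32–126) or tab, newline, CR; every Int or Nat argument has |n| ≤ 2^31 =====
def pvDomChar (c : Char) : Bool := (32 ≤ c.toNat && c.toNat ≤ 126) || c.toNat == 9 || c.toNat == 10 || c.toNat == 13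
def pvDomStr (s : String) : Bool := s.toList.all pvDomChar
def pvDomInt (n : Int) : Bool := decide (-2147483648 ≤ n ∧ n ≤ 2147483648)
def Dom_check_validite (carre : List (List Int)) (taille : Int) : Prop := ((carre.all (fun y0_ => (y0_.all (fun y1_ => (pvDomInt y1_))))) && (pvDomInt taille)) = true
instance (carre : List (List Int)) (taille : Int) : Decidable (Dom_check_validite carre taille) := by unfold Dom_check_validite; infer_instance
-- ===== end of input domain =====

-- B replaces A's count array and early returns with building the cell list once and
-- comparing its sorted order to 1..taille² (objective: simpler; return value only).

-- ===== PORT A =====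
-- the nested 'for loop1 … for loop2 …' with early returns, as recursion over the (loop1, loop2)
-- pairs carrying the count list 'liste_nb'; pyGet? is carre[loop1] / row[loop2] (none = IndexError,
-- mapped to false — reachable only outside Pre_); after the bounds check 0 ≤ v-1 < taille² =
-- liste_nb.length, so getD/set are exactly Python's liste_nb[v-1] read/write
def pvA_loop (carre : List (List Int)) (t2 : Int) : List Int → List (Int × Int) → Bool
  | _, [] => true
  | cnt, (i, j) :: rest =>
    match PySem.List.pyGet? carre i with
    | none => false
    | some row =>
      match PySem.List.pyGet? row j with
      | none => false
      | some v =>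
        if v > t2 || v ≤ 0 then false
        else
          let cnt' := cnt.set (v - 1).toNat (cnt.getD (v - 1).toNat 0 + 1)
          if cnt'.getD (v - 1).toNat 0 > 1 then false else pvA_loop carre t2 cnt' rest

def check_validite (carre : List (List Int)) (taille : Int) : Bool :=
  pvA_loop carre (taille ^ 2) (List.replicate (taille ^ 2).toNat 0)
    ((PySem.List.pyRange 0 taille 1).flatMap fun i =>
      (PySem.List.pyRange 0 taille 1).map fun j => (i, j))

-- ===== PORT B =====
-- vals = [carre[i][j] for i in range(taille) for j in range(taille)];
-- return sorted(vals) == list(range(1, len(vals) + 1)); the pyGet? … .getD pairs are the two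
-- index accesses (the default is reachable only outside Pre_, where Python raises IndexError)
def check_validite_alt (carre : List (List Int)) (taille : Int) : Bool :=
  let vals := (PySem.List.pyRange 0 taille 1).flatMap fun i =>
    (PySem.List.pyRange 0 taille 1).map fun j =>
      (PySem.List.pyGet? ((PySem.List.pyGet? carre i).getD []) j).getD 0
  decide (PySem.List.sorted vals (fun x => x) false
          = PySem.List.pyRange 1 ((vals.length : Int) + 1) 1)

-- ===== PRECONDITION & SPEC =====
-- Pre_ excludes grids lacking the full taille×taille region: there A may still short-circuit to
-- False on an early invalid cell before touching a missing one, while B, which reads every cell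
-- of the region, raises IndexError.
def Pre_check_validite (carre : List (List Int)) (taille : Int) : Prop :=
  taille.toNat ≤ carre.length ∧ ∀ row ∈ carre.take taille.toNat, taille.toNat ≤ row.length

instance (carre : List (List Int)) (taille : Int) : Decidable (Pre_check_validite carre taille) := by
  unfold Pre_check_validite; infer_instance

def pvWitness_check_validite : List (List Int) × Int := ([[1, 2], [4, 3]], 2)

def Spec_check_validite (carre : List (List Int)) (taille : Int) (out : Bool) : Prop := out = check_validite_alt carre taille
instance (carre : List (List Int)) (taille : Int) (out : Bool) : Decidable (Spec_check_validite carre taille out) := by unfold Spec_check_validite; infer_instance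

-- ===== CLAIM (what is proved, stated in full; the proofs are below) =====
def Claim_equal_check_validite : Prop := ∀ (carre : List (List Int)) (taille : Int), Dom_check_validite carre taille → Pre_check_validite carre taille → Spec_check_validite carre taille (check_validite carre taille)

-- ===== LEMMAS AND PROOFS =====

-- Pre_ unpacked per row index
lemma pvPre_spec (carre : List (List Int)) (taille : Int)
    (hpre : Pre_check_validite carre taille) (i : Nat) (hi : i < taille.toNat) :
    ∃ h : i < carre.length, taille.toNat ≤ carre[i].length := by
  obtain ⟨h1, h2⟩ := hpre
  have hlt : i < carre.length := lt_of_lt_of_le hi h1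
  refine ⟨hlt, ?_⟩
  have hi' : i < (carre.take taille.toNat).length := by
    rw [List.length_take]; omega
  have hmem : (carre.take taille.toNat)[i] ∈ carre.take taille.toNat :=
    List.getElem_mem hi'
  rw [List.getElem_take] at hmem
  exact h2 _ hmem

-- the list of all cell values of the taille×taille region, row-major (B's 'vals')
def pvVals (carre : List (List Int)) (taille : Int) : List Int :=
  (PySem.List.pyRange 0 taille 1).flatMap fun i =>
    (PySem.List.pyRange 0 taille 1).map fun j =>
      (PySem.List.pyGet? ((PySem.List.pyGet? carre i).getD []) j).getD 0

-- A's loop with the two grid-index accesses resolved away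
def pvPure (t2 : Int) : List Int → List Int → Bool
  | _, [] => true
  | cnt, v :: vs =>
    if v > t2 || v ≤ 0 then false
    else
      let cnt' := cnt.set (v - 1).toNat (cnt.getD (v - 1).toNat 0 + 1)
      if cnt'.getD (v - 1).toNat 0 > 1 then false else pvPure t2 cnt' vs

-- the count list 'liste_nb' after A has processed the values 'seen'
def pvCnt (t2 : Int) (seen : List Int) : List Int :=
  (PySem.List.pyRange 1 (t2 + 1) 1).map (fun w => ((seen.count w : Nat) : Int))

lemma pvCnt_length (t2 : Int) (seen : List Int) : (pvCnt t2 seen).length = t2.toNat := by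
  simp [pvCnt, PySem.List.length_pyRange_one]

lemma pvCnt_nil (t2 : Int) : pvCnt t2 [] = List.replicate t2.toNat 0 := by
  rw [List.eq_replicate_iff]
  refine ⟨pvCnt_length t2 [], ?_⟩
  simp [pvCnt]

lemma pvCnt_getD (t2 v : Int) (seen : List Int) (hv : 0 < v) (hv2 : v ≤ t2) :
    (pvCnt t2 seen).getD (v - 1).toNat 0 = ((seen.count v : Nat) : Int) := by
  have hk : (v - 1).toNat < (pvCnt t2 seen).length := by rw [pvCnt_length]; omega
  rw [List.getD_eq_getElem _ _ hk]
  have hk2 : (v - 1).toNat < (PySem.List.pyRange 1 (t2 + 1) 1).length := by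
    rw [PySem.List.length_pyRange_one]; omega
  simp only [pvCnt, List.getElem_map, PySem.List.getElem_pyRange_one _ _ _ hk2]
  congr 2
  omega

lemma pvCnt_set (t2 v : Int) (seen : List Int) (hv : 0 < v) (hv2 : v ≤ t2) :
    (pvCnt t2 seen).set (v - 1).toNat ((pvCnt t2 seen).getD (v - 1).toNat 0 + 1)
      = pvCnt t2 (seen ++ [v]) := by
  rw [pvCnt_getD t2 v seen hv hv2]
  apply List.ext_getElem
  · simp [pvCnt_length]
  · intro k h1 h2
    have hk : k < t2.toNat := by rw [List.length_set, pvCnt_length] at h1; exact h1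
    have hk2 : k < (PySem.List.pyRange 1 (t2 + 1) 1).length := by
      rw [PySem.List.length_pyRange_one]; omega
    rw [List.getElem_set]
    by_cases he : (v - 1).toNat = k
    · have hvk : (1 : Int) + (k : Int) = v := by omega
      simp only [he, pvCnt, List.getElem_map,
        PySem.List.getElem_pyRange_one _ _ _ hk2, hvk, List.count_append]
      simp
    · have hne : v ≠ (1 : Int) + (k : Int) := by omega
      simp only [if_neg he, pvCnt, List.getElem_map,
        PySem.List.getElem_pyRange_one _ _ _ hk2, List.count_append,
        List.count_singleton]
      simp [hne]

-- A's loop returns True iff every remaining value is in range and no duplicate arises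
lemma pvPure_iff (t2 : Int) (vs : List Int) : ∀ (seen : List Int),
    (∀ v ∈ seen, 0 < v ∧ v ≤ t2) → seen.Nodup →
    (pvPure t2 (pvCnt t2 seen) vs = true ↔
      (∀ v ∈ vs, 0 < v ∧ v ≤ t2) ∧ (seen ++ vs).Nodup) := by
  induction vs with
  | nil => intro seen hs hnd; simpa [pvPure] using hnd
  | cons v vs ih =>
    intro seen hs hnd
    by_cases hb : v > t2 ∨ v ≤ 0
    · have hcond : (v > t2 || v ≤ 0) = true := by simp [hb]
      rw [pvPure]
      simp only [hcond, if_true]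
      constructor
      · intro h; cases h
      · rintro ⟨hall, -⟩
        have := hall v (by simp)
        omega
    · push Not at hb
      have hv : 0 < v := by omega
      have hv2 : v ≤ t2 := by omega
      have hcond : (v > t2 || v ≤ 0) = false := by simp; omega
      rw [pvPure]
      simp only [hcond, Bool.false_eq_true, if_false]
      rw [pvCnt_set t2 v seen hv hv2, pvCnt_getD t2 v (seen ++ [v]) hv hv2]
      by_cases hmem : v ∈ seen
      · have hgt : 1 < (((seen ++ [v]).count v : Nat) : Int) := by
          have := List.count_pos_iff.mpr hmem
          simp [List.count_append]
          omega
        simp only [if_pos hgt]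
        constructor
        · intro h; cases h
        · rintro ⟨-, hnd2⟩
          exfalso
          rcases List.nodup_append.mp hnd2 with ⟨-, -, hdisj⟩
          exact hdisj v hmem v (by simp) rfl
      · have hle : ¬ (1 < (((seen ++ [v]).count v : Nat) : Int)) := by
          have := List.count_eq_zero_of_not_mem hmem
          simp [List.count_append, this]
        simp only [if_neg hle]
        have hs' : ∀ w ∈ seen ++ [v], 0 < w ∧ w ≤ t2 := by
          intro w hw
          rcases List.mem_append.mp hw with h | h
          · exact hs w h
          · simp at h; subst h; exact ⟨hv, hv2⟩
        have hnd' : (seen ++ [v]).Nodup := by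
          rw [List.nodup_append]
          refine ⟨hnd, List.nodup_singleton v, ?_⟩
          intro a ha b hb'
          simp at hb'
          subst hb'
          rintro rfl
          exact hmem ha
        rw [ih (seen ++ [v]) hs' hnd']
        constructor
        · rintro ⟨hall, hnd2⟩
          refine ⟨?_, ?_⟩
          · intro w hw
            rcases List.mem_cons.mp hw with h | h
            · subst h; exact ⟨hv, hv2⟩
            · exact hall w h
          · simpa [List.append_assoc] using hnd2
        · rintro ⟨hall, hnd2⟩
          refine ⟨fun w hw => hall w (List.mem_cons_of_mem _ hw), ?_⟩
          simpa [List.append_assoc] using hnd2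

-- inside Pre_, every grid access of A succeeds and the loop equals pvPure on the cell values
lemma pvA_loop_eq_pure (carre : List (List Int)) (taille t2 : Int)
    (hpre : Pre_check_validite carre taille) (ps : List (Int × Int))
    (hps : ∀ p ∈ ps, 0 ≤ p.1 ∧ p.1 < taille ∧ 0 ≤ p.2 ∧ p.2 < taille) :
    ∀ cnt, pvA_loop carre t2 cnt ps
      = pvPure t2 cnt (ps.map fun p =>
          (PySem.List.pyGet? ((PySem.List.pyGet? carre p.1).getD []) p.2).getD 0) := by
  induction ps with
  | nil => intro cnt; rfl
  | cons p ps ih =>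
    intro cnt
    obtain ⟨i, j⟩ := p
    obtain ⟨hi0, hi1, hj0, hj1⟩ := hps (i, j) (by simp)
    obtain ⟨hrow, hlen⟩ := pvPre_spec carre taille hpre i.toNat (by omega)
    have hgi : PySem.List.pyGet? carre i = some (carre[i.toNat]) := by
      rw [PySem.List.pyGet?_of_nonneg carre hi0, List.getElem?_eq_getElem hrow]
    have hjlt : j.toNat < (carre[i.toNat]).length := by omega
    have hgj : PySem.List.pyGet? (carre[i.toNat]) j = some ((carre[i.toNat])[j.toNat]) := by
      rw [PySem.List.pyGet?_of_nonneg _ hj0, List.getElem?_eq_getElem hjlt]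
    rw [List.map_cons, pvA_loop, hgi]
    simp only [Option.getD_some, hgj]
    rw [pvPure]
    by_cases hb : ((carre[i.toNat])[j.toNat] > t2 || (carre[i.toNat])[j.toNat] ≤ 0) = true
    · simp only [hb, if_true]
    · simp only [eq_false_of_ne_true hb, Bool.false_eq_true, if_false]
      split
      · rfl
      · exact ih (fun q hq => hps q (List.mem_cons_of_mem _ hq)) _

lemma pvVals_length (carre : List (List Int)) (taille : Int) :
    (pvVals carre taille).length = taille.toNat * taille.toNat := by
  simp [pvVals, List.length_flatMap,
    PySem.List.length_pyRange_one, List.map_const', List.sum_replicate, smul_eq_mul]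

-- A returns True iff all region cells lie in 1..taille² with no duplicates
lemma pvA_char (carre : List (List Int)) (taille : Int)
    (hpre : Pre_check_validite carre taille) :
    (check_validite carre taille = true ↔
      (∀ v ∈ pvVals carre taille, 0 < v ∧ v ≤ taille ^ 2) ∧ (pvVals carre taille).Nodup) := by
  have hps : ∀ p ∈ ((PySem.List.pyRange 0 taille 1).flatMap fun i =>
      (PySem.List.pyRange 0 taille 1).map fun j => (i, j)),
      0 ≤ p.1 ∧ p.1 < taille ∧ 0 ≤ p.2 ∧ p.2 < taille := by
    intro p hp
    simp only [List.mem_flatMap, List.mem_map] at hp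
    obtain ⟨i, hi, j, hj, rfl⟩ := hp
    rw [PySem.List.mem_pyRange_one] at hi hj
    exact ⟨hi.1, hi.2, hj.1, hj.2⟩
  rw [check_validite, ← pvCnt_nil,
    pvA_loop_eq_pure carre taille (taille ^ 2) hpre _ hps (pvCnt (taille ^ 2) [])]
  have hmap : (((PySem.List.pyRange 0 taille 1).flatMap fun i =>
      (PySem.List.pyRange 0 taille 1).map fun j => (i, j)).map fun p =>
        (PySem.List.pyGet? ((PySem.List.pyGet? carre p.1).getD []) p.2).getD 0)
      = pvVals carre taille := by
    simp [pvVals, List.map_flatMap, List.map_map, Function.comp_def]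
  rw [hmap, pvPure_iff (taille ^ 2) (pvVals carre taille) [] (by simp) List.nodup_nil]
  simp

lemma pvB_char (carre : List (List Int)) (taille : Int) :
    (check_validite_alt carre taille = true ↔
      PySem.List.sorted (pvVals carre taille) (fun x => x) false
        = PySem.List.pyRange 1 (((pvVals carre taille).length : Int) + 1) 1) := by
  rw [check_validite_alt]
  exact decide_eq_true_iff

-- ===== VERDICT (by name: the statement is the Claim_ definition above) =====
theorem check_validite_spec : Claim_equal_check_validite := by
  intro carre taille _ hpre
  unfold Spec_check_validite
  rw [Bool.eq_iff_iff, pvA_char carre taille hpre, pvB_char carre taille]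
  set vals := pvVals carre taille with hvals
  set n := vals.length with hn
  have hlen : (PySem.List.pyRange 1 ((n : Int) + 1) 1).length = n := by
    rw [PySem.List.length_pyRange_one]; omega
  by_cases hneg : taille < 0
  · have hempty : vals = [] := by
      rw [hvals, pvVals, PySem.List.pyRange_one_eq_nil (by omega : taille ≤ 0)]
      rfl
    have htgt : PySem.List.pyRange 1 ((n : Int) + 1) 1 = [] := by
      have hle : (n : Int) + 1 ≤ 1 := by rw [hn, hempty]; simp
      exact PySem.List.pyRange_one_eq_nil hle
    constructor
    · intro _
      rw [hempty, htgt, PySem.List.sorted_eq_nil_iff]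
    · intro _
      exact ⟨by simp [hempty], by simp [hempty]⟩
  · -- taille ≥ 0: taille² = n as integers
    have ht2 : (taille ^ 2 : Int) = (n : Int) := by
      rw [hn, hvals, pvVals_length, pow_two]
      push_cast
      rw [Int.toNat_of_nonneg (by omega : (0 : Int) ≤ taille)]
    constructor
    · rintro ⟨hall, hnd⟩
      apply PySem.List.sorted_eq_of_perm_of_pairwise_lt
      · refine List.Perm.symm (List.Subperm.perm_of_length_le ?_ ?_)
        · refine List.subperm_of_subset hnd ?_
          intro x hx
          rw [PySem.List.mem_pyRange_one]
          have := hall x hx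
          omega
        · rw [hlen]
      · exact PySem.List.pairwise_lt_pyRange_one _ _
    · intro hsorted
      have hperm : (PySem.List.pyRange 1 ((n : Int) + 1) 1).Perm vals := by
        rw [← hsorted]
        exact PySem.List.sorted_perm vals (fun x => x) false
      refine ⟨?_, ?_⟩
      · intro v hv
        have : v ∈ PySem.List.pyRange 1 ((n : Int) + 1) 1 := hperm.mem_iff.mpr hv
        rw [PySem.List.mem_pyRange_one] at this
        omega
      · exact hperm.nodup (PySem.List.nodup_pyRange_one _ _)
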